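-- pv_equiv track=rewrite | github.com/xing-ml/tamil-teacher | collector/test_prime_login.py | parse_selection_range
-- ===== SOURCE A (Python) =====
-- def parse_selection_range(items: list, selection: str) -> list:
--     """Parse user selection string into a list of matched items.
--
--     Supports:
--         - Single number: '1'
--         - Range: '7-8' (inclusive)
--         - Comma-separated: '1,4,6,7,10'
--         - Mixed: '1,3-5,8'
--
--     Args:
--         items: List of items to select from
--         selection: User's selection string
--
--     Returns:
--         List of matched items
--     """
--     if not items:
--         return []
--
--     selected = []
--     seen_indices = set()
--
--     for part in selection.split(','):
--         part = part.strip()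
--         if not part:
--             continue
--
--         if '-' in part:
--             # Range: '7-8'
--             parts = part.split('-', 1)
--             try:
--                 start = int(parts[0])
--                 end = int(parts[1])
--                 for i in range(start, end + 1):
--                     idx = i - 1  # Convert 1-indexed to 0-indexed
--                     if 0 <= idx < len(items) and idx not in seen_indices:
--                         selected.append(items[idx])
--                         seen_indices.add(idx)
--             except ValueError:
--                 pass
--         else:
--             # Single number: '1'
--             try:
--                 idx = int(part) - 1  # Convert 1-indexed to 0-indexed
--                 if 0 <= idx < len(items) and idx not in seen_indices:
--                     selected.append(items[idx])
--                     seen_indices.add(idx)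
--             except ValueError:
--                 pass
--
--     return selected
-- ===== SOURCE B (Python) =====
-- def parse_selection_range(items: list, selection: str) -> list:
--     """Same result as A, in two phases: flatten the selection into 1-indexed
--     numbers, then filter to valid 0-based indices and dedup (first occurrence)."""
--     if not items:
--         return []
--
--     nums = []
--     for part in selection.split(','):
--         part = part.strip()
--         if not part:
--             continue
--         if '-' in part:
--             a, b = part.split('-', 1)
--             try:
--                 nums.extend(range(int(a), int(b) + 1))
--             except ValueError:
--                 pass
--         else:
--             try:
--                 nums.append(int(part))
--             except ValueError:
--                 pass
--
--     idxs = [n - 1 for n in nums if 0 <= n - 1 < len(items)]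
--     return [items[i] for i in dict.fromkeys(idxs)]
-- ===== Notes on version B (the rewrite author's own statement) =====
-- stated objective: alternative
-- what changed: A interleaves parsing, bounds checks and seen-set dedup in one stateful loop with a nested range loop; B is a three-phase pipeline: flatten the selection into a list of 1-indexed numbers, filter to valid 0-based indices, then dedup by first occurrence with dict.fromkeys and map through items.
import Mathlib
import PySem

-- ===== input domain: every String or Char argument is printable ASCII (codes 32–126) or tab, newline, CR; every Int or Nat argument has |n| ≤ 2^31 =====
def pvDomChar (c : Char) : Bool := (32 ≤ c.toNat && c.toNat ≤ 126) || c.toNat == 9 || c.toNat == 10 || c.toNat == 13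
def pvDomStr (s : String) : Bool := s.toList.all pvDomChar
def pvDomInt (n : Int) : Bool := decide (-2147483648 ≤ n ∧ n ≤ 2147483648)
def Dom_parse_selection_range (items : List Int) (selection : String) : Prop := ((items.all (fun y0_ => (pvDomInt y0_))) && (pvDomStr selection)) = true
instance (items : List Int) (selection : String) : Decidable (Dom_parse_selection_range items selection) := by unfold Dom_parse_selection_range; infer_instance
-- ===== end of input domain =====

-- B re-decomposes A's single stateful loop into a three-phase pipeline (flatten numbers / filter indices / dedup+map); same result, no speed claim.

-- ===== PORT A =====
-- A's inner block for one 1-indexed number n: append items[idx] if idx valid and unseen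
def psrStep (items : List Int) (st : List Int × PySem.Set Int) (n : Int) : List Int × PySem.Set Int :=
  let idx := n - 1
  if 0 ≤ idx ∧ idx < PySem.List.len items ∧ idx ∉ st.2 then
    (st.1 ++ [PySem.List.pyGetD items idx 0], PySem.Set.add st.2 idx)
  else st

-- A's loop body for one comma-separated part (strip, range or single number, skip on ValueError)
def psrPart (items : List Int) (st : List Int × PySem.Set Int) (part0 : String) : List Int × PySem.Set Int :=
  let part := PySem.Str.strip part0
  if part = "" then st
  else if PySem.Str.isIn "-" part then
    match PySem.Str.splitMax? part "-" 1 with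
    | some parts =>
      match PySem.Int.ofStr? (parts.getD 0 ""), PySem.Int.ofStr? (parts.getD 1 "") with
      | some s, some e => (PySem.List.pyRange s (e + 1) 1).foldl (psrStep items) st
      | _, _ => st
    | none => st
  else
    match PySem.Int.ofStr? part with
    | some n => psrStep items st n
    | none => st

def parse_selection_range (items : List Int) (selection : String) : List Int :=
  if items = [] then []
  else (((PySem.Str.split? selection ",").getD []).foldl (psrPart items) ([], PySem.Set.empty)).1

-- ===== PORT B =====
-- B phase 1 loop body: the 1-indexed numbers one part contributes, appended to the accumulator
def psrPartNums (nums : List Int) (part0 : String) : List Int :=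
  let part := PySem.Str.strip part0
  if part = "" then nums
  else if PySem.Str.isIn "-" part then
    match PySem.Str.splitMax? part "-" 1 with
    | some parts =>
      match PySem.Int.ofStr? (parts.getD 0 ""), PySem.Int.ofStr? (parts.getD 1 "") with
      | some a, some b => nums ++ PySem.List.pyRange a (b + 1) 1
      | _, _ => nums
    | none => nums
  else
    match PySem.Int.ofStr? part with
    | some n => nums ++ [n]
    | none => nums

def parse_selection_range_alt (items : List Int) (selection : String) : List Int :=
  if items = [] then []
  else
    let nums := ((PySem.Str.split? selection ",").getD []).foldl psrPartNums []
    let idxs := (nums.map (fun n => n - 1)).filter (fun i => decide (0 ≤ i ∧ i < PySem.List.len items))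
    (PySem.List.dedup idxs).map (fun i => PySem.List.pyGetD items i 0)   -- dict.fromkeys = ordered first-occurrence dedup

-- ===== PRECONDITION & SPEC =====
def Spec_parse_selection_range (items : List Int) (selection : String) (out : List Int) : Prop := out = parse_selection_range_alt items selection
instance (items : List Int) (selection : String) (out : List Int) : Decidable (Spec_parse_selection_range items selection out) := by unfold Spec_parse_selection_range; infer_instance

-- ===== CLAIM (what is proved, stated in full; the proofs are below) =====
def Claim_equal_parse_selection_range : Prop := ∀ (items : List Int) (selection : String), Dom_parse_selection_range items selection → Spec_parse_selection_range items selection (parse_selection_range items selection)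

-- ===== LEMMAS AND PROOFS =====

-- indices newly added when processing index list l with `seen` already seen (first occurrences, in order)
def psrNew (seen : List Int) : List Int → List Int
  | [] => []
  | i :: t => if i ∈ seen then psrNew seen t else i :: psrNew (seen ++ [i]) t

-- the valid 0-based indices contributed by the 1-indexed numbers ns
def psrIdxs (items : List Int) (ns : List Int) : List Int :=
  (ns.map (fun n => n - 1)).filter (fun i => decide (0 ≤ i ∧ i < PySem.List.len items))

lemma psrIdxs_cons (items : List Int) (n : Int) (t : List Int) :
    psrIdxs items (n :: t) =
      if 0 ≤ n - 1 ∧ n - 1 < PySem.List.len items then (n - 1) :: psrIdxs items t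
      else psrIdxs items t := by
  simp only [psrIdxs, List.map_cons, List.filter_cons, decide_eq_true_eq,
    PySem.List.len_eq]

lemma fold_psrStep (items : List Int) (ns : List Int) (sel seen : List Int) :
    ns.foldl (psrStep items) (sel, seen) =
      (sel ++ (psrNew seen (psrIdxs items ns)).map (fun i => PySem.List.pyGetD items i 0),
       seen ++ psrNew seen (psrIdxs items ns)) := by
  induction ns generalizing sel seen with
  | nil => simp [psrIdxs, psrNew]
  | cons n t ih =>
    rw [List.foldl_cons]
    by_cases hv : 0 ≤ n - 1 ∧ n - 1 < PySem.List.len items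
    · by_cases hs : n - 1 ∈ seen
      · have hstep : psrStep items (sel, seen) n = (sel, seen) := by
          simp only [psrStep]
          rw [if_neg (by simp [hs])]
        rw [hstep, ih, psrIdxs_cons, if_pos hv]
        simp [psrNew, hs]
      · have hadd : PySem.Set.add seen (n - 1) = seen ++ [n - 1] := by
          simp only [PySem.Set.add]
          rw [if_neg (by simpa using hs)]
        have hstep : psrStep items (sel, seen) n =
            (sel ++ [PySem.List.pyGetD items (n - 1) 0], seen ++ [n - 1]) := by
          simp only [psrStep]
          rw [if_pos ⟨hv.1, hv.2, hs⟩, hadd]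
        rw [hstep, ih, psrIdxs_cons, if_pos hv]
        simp [psrNew, hs]
    · have hstep : psrStep items (sel, seen) n = (sel, seen) := by
        simp only [psrStep]
        rw [if_neg (fun h => hv ⟨h.1, h.2.1⟩)]
      rw [hstep, ih, psrIdxs_cons, if_neg hv]

lemma psrPart_eq_fold (items : List Int) (st : List Int × PySem.Set Int) (p : String) :
    psrPart items st p = (psrPartNums [] p).foldl (psrStep items) st := by
  unfold psrPart psrPartNums
  by_cases h0 : PySem.Str.strip p = ""
  · simp [h0]
  · simp only [h0, if_false]
    by_cases h1 : PySem.Str.isIn "-" (PySem.Str.strip p)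
    · simp only [h1, if_true]
      cases PySem.Str.splitMax? (PySem.Str.strip p) "-" 1 with
      | none => simp
      | some parts =>
        dsimp only
        cases PySem.Int.ofStr? (parts.getD 0 "") <;>
          cases PySem.Int.ofStr? (parts.getD 1 "") <;> simp
    · simp only [h1, Bool.false_eq_true, if_false]
      cases PySem.Int.ofStr? (PySem.Str.strip p) with
      | none => simp
      | some n => simp

lemma psrPartNums_acc (nums : List Int) (p : String) :
    psrPartNums nums p = nums ++ psrPartNums [] p := by
  unfold psrPartNums
  by_cases h0 : PySem.Str.strip p = ""
  · simp [h0]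
  · simp only [h0, if_false]
    by_cases h1 : PySem.Str.isIn "-" (PySem.Str.strip p)
    · simp only [h1, if_true]
      cases PySem.Str.splitMax? (PySem.Str.strip p) "-" 1 with
      | none => simp
      | some parts =>
        dsimp only
        cases PySem.Int.ofStr? (parts.getD 0 "") <;>
          cases PySem.Int.ofStr? (parts.getD 1 "") <;> simp
    · simp only [h1, Bool.false_eq_true, if_false]
      cases PySem.Int.ofStr? (PySem.Str.strip p) with
      | none => simp
      | some n => simp

lemma foldl_psrPartNums_eq_flatMap (parts : List String) (acc : List Int) :
    parts.foldl psrPartNums acc = acc ++ parts.flatMap (psrPartNums []) := by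
  rw [← PySem.List.foldl_append_eq_flatMap (psrPartNums []) parts acc]
  exact PySem.List.foldl_congr_mem parts _ _ acc (fun a x _ => psrPartNums_acc a x)

lemma foldl_psrPart_eq (items : List Int) (parts : List String) (st : List Int × PySem.Set Int) :
    parts.foldl (psrPart items) st = (parts.flatMap (psrPartNums [])).foldl (psrStep items) st := by
  induction parts generalizing st with
  | nil => simp
  | cons p t ih =>
    simp only [List.foldl_cons, List.flatMap_cons, List.foldl_append]
    rw [psrPart_eq_fold, ih]

lemma foldl_add_eq_psrNew (l acc : List Int) :
    l.foldl PySem.Set.add acc = acc ++ psrNew acc l := by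
  induction l generalizing acc with
  | nil => simp [psrNew]
  | cons i t ih =>
    by_cases h : i ∈ acc
    · have hadd : PySem.Set.add acc i = acc := by simp [PySem.Set.add, h]
      rw [List.foldl_cons, hadd, ih]
      simp [psrNew, h]
    · have hadd : PySem.Set.add acc i = acc ++ [i] := by simp [PySem.Set.add, h]
      rw [List.foldl_cons, hadd, ih]
      simp [psrNew, h]

lemma psrNew_nil_eq_dedup (l : List Int) : psrNew [] l = PySem.List.dedup l := by
  have := foldl_add_eq_psrNew l []
  simp only [List.nil_append] at this
  rw [PySem.List.dedup_eq_ofList, PySem.Set.ofList_eq_foldl, ← this]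

-- ===== VERDICT (by name: the statement is the Claim_ definition above) =====
theorem parse_selection_range_spec : Claim_equal_parse_selection_range := by
  intro items selection _
  unfold Spec_parse_selection_range parse_selection_range parse_selection_range_alt
  by_cases hi : items = []
  · simp [hi]
  · simp only [hi, if_false]
    rw [foldl_psrPart_eq, fold_psrStep]
    simp [psrIdxs, psrNew_nil_eq_dedup, foldl_psrPartNums_eq_flatMap, PySem.Set.empty]
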